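-- pv_equiv track=rewrite | github.com/vidstige/aoc | 2020/9.py | invalid
-- ===== SOURCE A (Python) =====
-- from itertools import combinations
--
-- def invalid(sequence, preamble):
--     active = sequence[:preamble]
--     for n in sequence[preamble:]:
--         valid = set(i + j for i, j in combinations(active, 2))
--         if n not in valid:
--             yield n
--         active.pop(0)
--         active.append(n)
-- ===== SOURCE B (Python) =====
-- def invalid(sequence, preamble):
--     w = len(sequence[:preamble])
--     for i in range(w, len(sequence)):
--         n = sequence[i]
--         ws = sorted(sequence[i - w:i])
--         lo, hi = 0, len(ws) - 1
--         found = False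
--         while lo < hi:
--             s = ws[lo] + ws[hi]
--             if s == n:
--                 found = True
--                 break
--             elif s < n:
--                 lo += 1
--             else:
--                 hi -= 1
--         if not found:
--             yield n
-- ===== Notes on version B (the rewrite author's own statement) =====
-- stated objective: faster
-- what changed: Replaces A's sliding pop/append window with per-element enumeration of all pairwise sums (itertools.combinations) by an index loop that slices each window, sorts it and runs a two-pointer two-sum scan.
import Mathlib
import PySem

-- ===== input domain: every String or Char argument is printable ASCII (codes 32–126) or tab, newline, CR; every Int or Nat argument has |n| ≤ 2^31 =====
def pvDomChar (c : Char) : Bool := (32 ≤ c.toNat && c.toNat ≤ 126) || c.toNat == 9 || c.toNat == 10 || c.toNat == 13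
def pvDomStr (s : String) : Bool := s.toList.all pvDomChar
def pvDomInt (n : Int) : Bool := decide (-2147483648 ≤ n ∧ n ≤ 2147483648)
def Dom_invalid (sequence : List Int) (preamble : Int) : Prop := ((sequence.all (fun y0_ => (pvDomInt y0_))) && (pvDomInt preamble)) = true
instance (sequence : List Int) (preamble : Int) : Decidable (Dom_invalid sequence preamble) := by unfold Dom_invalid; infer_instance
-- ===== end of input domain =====

-- B replaces A's sliding pop/append window with per-element combination sums by an index
-- loop that sorts each window and runs a two-pointer two-sum scan (return-value equivalence).

-- ===== PORT A =====
-- A's loop body: valid = set(i+j for combinations(active,2)); yield n if absent; active.pop(0); active.append(n)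
def invalidLoopA (tail : List Int) (active : List Int) : List Int :=
  match tail with
  | [] => []
  | n :: rest =>
    let valid : PySem.Set Int := PySem.Set.ofList ((PySem.List.combinations active 2).map List.sum)
    let emit : List Int := if PySem.Set.contains valid n then [] else [n]
    match PySem.List.pop? active 0 with
    | none => emit  -- active.pop(0) raises IndexError here (generator stops); excluded by Pre_invalid
    | some (_, rest') => emit ++ invalidLoopA rest (rest' ++ [n])

def invalid (sequence : List Int) (preamble : Int) : List Int :=
  invalidLoopA (PySem.List.slice sequence (some preamble) none)
               (PySem.List.slice sequence none (some preamble))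

-- ===== PORT B =====
-- Source B's while loop: two pointers over the sorted window, stop at the first pair summing to n
-- fuel = hi - lo bounds the iteration count of the while loop
def twoPtrF (n : Int) (ws : List Int) : Nat → Nat → Nat → Bool
  | 0, _, _ => false
  | fuel + 1, lo, hi =>
    if lo < hi then
      let s := ws.getD lo 0 + ws.getD hi 0   -- ws[lo] + ws[hi]; both indices are in range whenever lo < hi ≤ len ws - 1
      if s = n then true
      else if s < n then twoPtrF n ws fuel (lo + 1) hi
      else twoPtrF n ws fuel lo (hi - 1)
    else false

def twoPtr (n : Int) (ws : List Int) (lo hi : Nat) : Bool :=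
  twoPtrF n ws (hi - lo) lo hi

def invalid_alt (sequence : List Int) (preamble : Int) : List Int :=
  let w : Nat := (PySem.List.slice sequence none (some preamble)).length   -- w = len(sequence[:preamble])
  (PySem.List.pyRange (w : Int) (sequence.length : Int) 1).filterMap (fun i =>
    let n := PySem.List.pyGetD sequence i 0          -- sequence[i]; i is in range on this loop
    let ws := PySem.List.sorted (PySem.List.slice sequence (some (i - (w : Int))) (some i)) (fun x => x) false
    if twoPtr n ws 0 (ws.length - 1) then none else some n)

-- ===== PRECONDITION & SPEC =====
-- Pre_ excludes exactly the inputs where A's generator raises IndexError on active.pop(0):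
-- an empty initial window (sequence[:preamble] == []) with a nonempty remainder.
def Pre_invalid (sequence : List Int) (preamble : Int) : Prop :=
  PySem.List.slice sequence none (some preamble) ≠ [] ∨
  PySem.List.slice sequence (some preamble) none = []
instance (sequence : List Int) (preamble : Int) : Decidable (Pre_invalid sequence preamble) := by unfold Pre_invalid; infer_instance
def pvWitness_invalid : List Int × Int := ([35, 20, 15, 25, 47, 40, 62, 55], 2)

def Spec_invalid (sequence : List Int) (preamble : Int) (out : List Int) : Prop := out = invalid_alt sequence preamble
instance (sequence : List Int) (preamble : Int) (out : List Int) : Decidable (Spec_invalid sequence preamble out) := by unfold Spec_invalid; infer_instance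

-- ===== CLAIM (what is proved, stated in full; the proofs are below) =====
def Claim_equal_invalid : Prop := ∀ (sequence : List Int) (preamble : Int), Dom_invalid sequence preamble → Pre_invalid sequence preamble → Spec_invalid sequence preamble (invalid sequence preamble)

-- ===== LEMMAS AND PROOFS =====

-- "some two distinct positions of xs sum to n", structurally
def HasPair (n : Int) : List Int → Prop
  | [] => False
  | x :: xs => (∃ b ∈ xs, x + b = n) ∨ HasPair n xs

lemma mem_combSum (n : Int) (xs : List Int) :
    n ∈ (PySem.List.combinations xs 2).map List.sum ↔ HasPair n xs := by
  induction xs with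
  | nil => simp [PySem.List.combinations_nil_succ, HasPair]
  | cons x xs ih =>
    rw [show PySem.List.combinations (x :: xs) 2
        = (PySem.List.combinations xs 1).map (x :: ·) ++ PySem.List.combinations xs 2
      from PySem.List.combinations_cons_succ x xs 1]
    rw [PySem.List.combinations_one]
    simp only [List.map_append, List.mem_append, ih, HasPair, List.map_map, List.mem_map,
      Function.comp, List.sum_cons, List.sum_nil]
    constructor
    · rintro (⟨b, hb, hs⟩ | h)
      · exact Or.inl ⟨b, hb, by omega⟩
      · exact Or.inr h
    · rintro (⟨b, hb, hs⟩ | h)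
      · exact Or.inl ⟨b, hb, by omega⟩
      · exact Or.inr h

lemma hasPair_perm {xs ys : List Int} (h : xs.Perm ys) (n : Int) :
    HasPair n xs ↔ HasPair n ys := by
  induction h with
  | nil => exact Iff.rfl
  | cons x h ih =>
    simp only [HasPair, ih]
    constructor
    · rintro (⟨b, hb, hs⟩ | h') <;> [exact Or.inl ⟨b, (h.mem_iff).1 hb, hs⟩; exact Or.inr h']
    · rintro (⟨b, hb, hs⟩ | h') <;> [exact Or.inl ⟨b, (h.mem_iff).2 hb, hs⟩; exact Or.inr h']
  | swap x y l =>
    simp only [HasPair, List.mem_cons]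
    constructor
    · rintro (⟨b, rfl | hb, hs⟩ | ⟨b, hb, hs⟩ | h')
      · exact Or.inl ⟨y, Or.inl rfl, by omega⟩
      · exact Or.inr (Or.inl ⟨b, hb, hs⟩)
      · exact Or.inl ⟨b, Or.inr hb, hs⟩
      · exact Or.inr (Or.inr h')
    · rintro (⟨b, rfl | hb, hs⟩ | ⟨b, hb, hs⟩ | h')
      · exact Or.inl ⟨x, Or.inl rfl, by omega⟩
      · exact Or.inr (Or.inl ⟨b, hb, hs⟩)
      · exact Or.inl ⟨b, Or.inr hb, hs⟩
      · exact Or.inr (Or.inr h')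
  | trans _ _ ih1 ih2 => exact (ih1).trans (ih2)

lemma hasPair_iff_idx (n : Int) (xs : List Int) :
    HasPair n xs ↔ ∃ i j, i < j ∧ j < xs.length ∧ xs.getD i 0 + xs.getD j 0 = n := by
  induction xs with
  | nil => simp [HasPair]
  | cons x xs ih =>
    simp only [HasPair, ih, List.length_cons]
    constructor
    · rintro (⟨b, hb, hs⟩ | ⟨i, j, hij, hj, hs⟩)
      · obtain ⟨j, hj, hbj⟩ := List.getElem_of_mem hb
        refine ⟨0, j + 1, by omega, by omega, ?_⟩
        simp [List.getD_eq_getElem?_getD, hj, hbj, hs]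
      · exact ⟨i + 1, j + 1, by omega, by omega, by simpa [List.getD_cons_succ] using hs⟩
    · rintro ⟨i, j, hij, hj, hs⟩
      cases i with
      | zero =>
        cases j with
        | zero => omega
        | succ j =>
          have hjlen : j < xs.length := by omega
          refine Or.inl ⟨xs.getD j 0, ?_, by simpa [List.getD_cons_succ] using hs⟩
          rw [List.getD_eq_getElem xs 0 hjlen]
          exact List.getElem_mem hjlen
      | succ i =>
        cases j with
        | zero => omega
        | succ j =>
          exact Or.inr ⟨i, j, by omega, by omega, by simpa [List.getD_cons_succ] using hs⟩

lemma twoPtrF_sound (n : Int) (ws : List Int) (fuel : Nat) : ∀ lo hi : Nat,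
    twoPtrF n ws fuel lo hi = true →
    ∃ i j, lo ≤ i ∧ i < j ∧ j ≤ hi ∧ ws.getD i 0 + ws.getD j 0 = n := by
  induction fuel with
  | zero => intro lo hi h; simp [twoPtrF] at h
  | succ fuel ih =>
    intro lo hi h
    rw [twoPtrF] at h
    by_cases hlt : lo < hi
    · simp only [hlt, if_true] at h
      split_ifs at h with h1 h2
      · exact ⟨lo, hi, le_refl _, hlt, le_refl _, h1⟩
      · obtain ⟨i, j, hi1, hi2, hi3, hi4⟩ := ih _ _ h
        exact ⟨i, j, by omega, hi2, hi3, hi4⟩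
      · obtain ⟨i, j, hi1, hi2, hi3, hi4⟩ := ih _ _ h
        exact ⟨i, j, hi1, hi2, by omega, hi4⟩
    · simp [hlt] at h

lemma twoPtrF_complete (n : Int) (ws : List Int)
    (hmono : ∀ p q : Nat, p ≤ q → q < ws.length → ws.getD p 0 ≤ ws.getD q 0)
    (fuel : Nat) : ∀ lo hi i j : Nat, hi - lo ≤ fuel →
    lo ≤ i → i < j → j ≤ hi → hi < ws.length →
    ws.getD i 0 + ws.getD j 0 = n →
    twoPtrF n ws fuel lo hi = true := by
  induction fuel with
  | zero => intro lo hi i j hf h1 h2 h3 h4 _; omega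
  | succ fuel ih =>
    intro lo hi i j hf h1 h2 h3 h4 hs
    have hlt : lo < hi := by omega
    rw [twoPtrF]
    simp only [hlt, if_true]
    split_ifs with e1 e2
    · rfl
    · -- ws[lo] + ws[hi] < n: any pair with first index lo sums to at most that; so lo < i
      have hilo : lo < i := by
        by_contra hc
        have hieq : i = lo := by omega
        have := hmono j hi (by omega) h4
        have := hmono i i (le_refl _) (by omega)
        subst hieq
        omega
      exact ih (lo + 1) hi i j (by omega) (by omega) h2 h3 h4 hs
    · -- ws[lo] + ws[hi] > n: any pair with second index hi sums to at least that; so j < hi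
      have hjhi : j < hi := by
        by_contra hc
        have hjeq : j = hi := by omega
        have := hmono lo i (by omega) (by omega)
        subst hjeq
        omega
      exact ih lo (hi - 1) i j (by omega) h1 h2 (by omega) (by omega) hs

lemma twoPtr_iff_hasPair (n : Int) (active : List Int) :
    twoPtr n (PySem.List.sorted active (fun x => x) false) 0
        ((PySem.List.sorted active (fun x => x) false).length - 1) = true
      ↔ HasPair n active := by
  set ws := PySem.List.sorted active (fun x => x) false with hws
  have hperm : ws.Perm active := PySem.List.sorted_perm active (fun x => x) false
  have hmono : ∀ p q : Nat, p ≤ q → q < ws.length → ws.getD p 0 ≤ ws.getD q 0 := by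
    intro p q hpq hq
    rw [List.getD_eq_getElem ws 0 (by omega), List.getD_eq_getElem ws 0 hq]
    exact PySem.List.sorted_id_getElem_mono active hpq hq
  rw [← hasPair_perm hperm, hasPair_iff_idx]
  constructor
  · intro h
    obtain ⟨i, j, _, h2, h3, h4⟩ := twoPtrF_sound n ws _ _ _ h
    exact ⟨i, j, h2, by omega, h4⟩
  · rintro ⟨i, j, hij, hj, hs⟩
    exact twoPtrF_complete n ws hmono _ 0 (ws.length - 1) i j (by omega) (by omega) hij
      (by omega) (by omega) hs

lemma emit_iff (n : Int) (active : List Int) :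
    (PySem.Set.contains (PySem.Set.ofList ((PySem.List.combinations active 2).map List.sum)) n)
      = twoPtr n (PySem.List.sorted active (fun x => x) false) 0
          ((PySem.List.sorted active (fun x => x) false).length - 1) := by
  have h1 : (PySem.Set.contains (PySem.Set.ofList ((PySem.List.combinations active 2).map List.sum)) n) = true
      ↔ HasPair n active := by
    simp only [PySem.Set.contains, List.contains_iff_mem, PySem.Set.mem_ofList]
    exact mem_combSum n active
  have h2 := twoPtr_iff_hasPair n active
  cases hb : twoPtr n (PySem.List.sorted active (fun x => x) false) 0
      ((PySem.List.sorted active (fun x => x) false).length - 1) with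
  | true => exact h1.2 (h2.1 hb)
  | false =>
    cases hc : PySem.Set.contains (PySem.Set.ofList ((PySem.List.combinations active 2).map List.sum)) n with
    | false => rfl
    | true =>
      rw [hc] at h1
      rw [h2.2 (h1.1 rfl)] at hb
      exact hb

-- B's loop, rephrased structurally over the remaining tail with the full list and window width
def specB (all : List Int) (w : Nat) (tail : List Int) : List Int :=
  (List.range tail.length).filterMap (fun k =>
    let n := tail.getD k 0
    let ws := PySem.List.sorted ((all.drop k).take w) (fun x => x) false
    if twoPtr n ws 0 (ws.length - 1) then none else some n)

lemma loopA_eq_specB (tail : List Int) : ∀ active : List Int, (active ≠ [] ∨ tail = []) →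
    invalidLoopA tail active = specB (active ++ tail) active.length tail := by
  induction tail with
  | nil => intro active _; simp [invalidLoopA, specB]
  | cons n rest ih =>
    rintro active (hne | h)
    · cases active with
      | nil => exact absurd rfl hne
      | cons a act' =>
        rw [invalidLoopA]
        simp only [PySem.List.pop?_zero_cons]
        rw [ih (act' ++ [n]) (Or.inl (by simp))]
        have hw : (act' ++ [n]).length = (a :: act').length := by simp
        rw [hw]
        unfold specB
        simp only [List.length_cons, List.range_succ_eq_map, List.filterMap_cons,
          List.filterMap_map, List.getD_cons_zero, List.drop_zero, Function.comp,
          List.getD_cons_succ, List.drop_succ_cons, List.cons_append, List.append_assoc]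
        rw [emit_iff,
          show (PySem.List.sorted (a :: act') (fun x => x) false).length - 1 = act'.length
            from by simp]
        cases htp : twoPtr n (PySem.List.sorted (a :: act') (fun x => x) false) 0 act'.length with
        | true => simp [htp]
        | false => simp [htp]
    · simp at h

lemma slice_halves (xs : List Int) (p : Int) :
    PySem.List.slice xs none (some p) ++ PySem.List.slice xs (some p) none = xs := by
  rw [PySem.List.slice_some_none]
  have : PySem.List.slice xs none (some p) = xs.take (PySem.List.clampIdx xs.length p) := by
    simp [PySem.List.slice]
  rw [this]
  exact List.take_append_drop _ xs

lemma length_slice_to (xs : List Int) (p : Int) :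
    (PySem.List.slice xs none (some p)).length + (PySem.List.slice xs (some p) none).length
      = xs.length := by
  conv_rhs => rw [← slice_halves xs p]
  simp

lemma alt_eq_specB (sequence : List Int) (preamble : Int) :
    invalid_alt sequence preamble =
      specB sequence (PySem.List.slice sequence none (some preamble)).length
        (PySem.List.slice sequence (some preamble) none) := by
  dsimp only [invalid_alt, specB]
  set w : Nat := (PySem.List.slice sequence none (some preamble)).length with hwdef
  set tail := PySem.List.slice sequence (some preamble) none with htdef
  have hlen : w + tail.length = sequence.length := length_slice_to sequence preamble
  rw [PySem.List.pyRange_one]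
  have hcnt : ((sequence.length : Int) - (w : Int)).toNat = tail.length := by omega
  rw [hcnt, List.filterMap_map]
  apply List.filterMap_congr
  intro k hk
  have hk' : k < tail.length := List.mem_range.mp hk
  simp only [Function.comp]
  have e2 : (w : Int) + (k : Int) - (w : Int) = ((k : Nat) : Int) := by ring
  rw [e2]
  have e3 : (w : Int) + (k : Int) = ((k : Nat) : Int) + ((w : Nat) : Int) := by ring
  rw [e3, PySem.List.slice_natCast_add]
  have e4 : PySem.List.pyGetD sequence ((k : Int) + (w : Int)) 0 = tail.getD k 0 := by
    have hcast : (k : Int) + (w : Int) = ((w + k : Nat) : Int) := by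
      push_cast
      ring
    rw [hcast, PySem.List.pyGetD_natCast]
    conv_lhs => rw [← slice_halves sequence preamble, ← htdef]
    rw [List.getD_eq_getElem?_getD, List.getD_eq_getElem?_getD,
      List.getElem?_append_right (by rw [← hwdef]; omega)]
    congr 2
    rw [← hwdef]
    omega
  rw [e4]

-- ===== VERDICT (by name: the statement is the Claim_ definition above) =====
theorem invalid_spec : Claim_equal_invalid := by
  intro sequence preamble _ hpre
  unfold Spec_invalid invalid
  rw [alt_eq_specB]
  have h := loopA_eq_specB (PySem.List.slice sequence (some preamble) none)
    (PySem.List.slice sequence none (some preamble)) hpre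
  rw [h, slice_halves]
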